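-- pv_equiv track=rewrite | github.com/aulb/notes | matrix/ValidSudoku.py | check3x3
-- ===== SOURCE A (Python) =====
-- def check3x3(board):
--     check = {}
--     for row in board:
--         for num in row:
--             if num == ".": continue
--             if num in check: return False
--             check[num] = True
--     return True
-- ===== SOURCE B (Python) =====
-- def check3x3(board):
--     nums = sorted(num for row in board for num in row if num != ".")
--     return all(a != b for a, b in zip(nums, nums[1:]))
-- ===== Notes on version B (the rewrite author's own statement) =====
-- stated objective: alternative
-- what changed: Replaced A's incremental hash-dict membership loop with early return by sort-then-scan: sort the non-'.' entries and decide duplicates by checking that no two ADJACENT elements of the sorted list are equal (zip of the list with its tail); no membership structure is maintained at all.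
import Mathlib
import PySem

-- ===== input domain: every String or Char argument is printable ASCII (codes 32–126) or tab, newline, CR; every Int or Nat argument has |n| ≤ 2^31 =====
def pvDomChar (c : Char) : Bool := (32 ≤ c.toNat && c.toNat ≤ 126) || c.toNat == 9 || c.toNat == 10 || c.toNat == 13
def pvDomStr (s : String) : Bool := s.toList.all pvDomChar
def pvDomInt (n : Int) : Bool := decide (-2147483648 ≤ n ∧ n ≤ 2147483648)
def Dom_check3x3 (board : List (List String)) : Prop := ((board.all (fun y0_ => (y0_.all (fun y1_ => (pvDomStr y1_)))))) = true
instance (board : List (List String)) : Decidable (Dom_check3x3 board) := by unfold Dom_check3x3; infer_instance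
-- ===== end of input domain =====

-- B replaces A's incremental dict-membership loop (early return on a seen digit) by sort-then-scan:
-- sort the non-'.' entries and check that no two adjacent elements of the sorted list are equal
-- (alternative algorithm; no membership structure at all).

-- ===== PORT A =====
-- inner 'for num in row' loop: none = the 'return False' path, some d' = the updated check dict
def check3x3Row : PySem.Dict String Bool → List String → Option (PySem.Dict String Bool)
  | d, [] => some d
  | d, num :: rest =>
    if num = "." then check3x3Row d rest
    else if d.contains num then none
    else check3x3Row (d.insert num true) rest

-- outer 'for row in board' loop
def check3x3Rows : PySem.Dict String Bool → List (List String) → Bool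
  | _, [] => true
  | d, row :: rest =>
    match check3x3Row d row with
    | none => false
    | some d' => check3x3Rows d' rest

def check3x3 (board : List (List String)) : Bool :=
  check3x3Rows PySem.Dict.empty board

-- ===== PORT B =====
-- nums = sorted(non-'.' entries); all(a != b for a, b in zip(nums, nums[1:]))
-- (nums[1:] on a list is List.drop 1 — exact for this nonnegative slice)
def check3x3_alt (board : List (List String)) : Bool :=
  let nums := PySem.List.sorted (board.flatMap (fun row => row.filter (fun num => num ≠ "."))) (fun x => x) false
  (nums.zip (nums.drop 1)).all (fun p => p.1 != p.2)

-- ===== PRECONDITION & SPEC =====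
def Spec_check3x3 (board : List (List String)) (out : Bool) : Prop := out = check3x3_alt board
instance (board : List (List String)) (out : Bool) : Decidable (Spec_check3x3 board out) := by unfold Spec_check3x3; infer_instance

-- ===== CLAIM (what is proved, stated in full; the proofs are below) =====
def Claim_equal_check3x3 : Prop := ∀ (board : List (List String)), Dom_check3x3 board → Spec_check3x3 board (check3x3 board)

-- ===== LEMMAS AND PROOFS =====

-- the non-'.' entries of the board, in reading order
def pvNums (board : List (List String)) : List String :=
  board.flatMap (fun row => row.filter (fun num => num ≠ "."))

-- B-side: the zip-with-tail 'all' computes Chain' (· ≠ ·)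
theorem pv_allZip_eq_isChain : ∀ (l : List String),
    ((l.zip (l.drop 1)).all (fun p => p.1 != p.2)) = decide (List.IsChain (· ≠ ·) l)
  | [] => by simp
  | [a] => by simp
  | a :: b :: t => by
    have ih := pv_allZip_eq_isChain (b :: t)
    simp only [List.drop_succ_cons, List.drop_zero, List.zip_cons_cons, List.all_cons,
      List.isChain_cons_cons] at ih ⊢
    rw [ih]
    by_cases h : a = b <;> simp [h]

-- on a ≤-sorted list, adjacent-distinct forces strict increase
theorem pv_isChain_lt (l : List String) :
    l.Pairwise (· ≤ ·) → List.IsChain (· ≠ ·) l → List.IsChain (· < ·) l := by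
  induction l with
  | nil => intro _ _; simp
  | cons a t ih =>
    intro hs hc
    cases t with
    | nil => simp
    | cons b t' =>
      rw [List.isChain_cons_cons] at hc ⊢
      refine ⟨lt_of_le_of_ne ((List.pairwise_cons.mp hs).1 b (by simp)) hc.1, ih hs.tail hc.2⟩

-- on a ≤-sorted list, adjacent-distinct ⟺ no duplicates
theorem pv_isChain_ne_iff_nodup (l : List String) (hs : l.Pairwise (· ≤ ·)) :
    List.IsChain (· ≠ ·) l ↔ l.Nodup := by
  constructor
  · intro hc
    have hlt : l.Pairwise (· < ·) := List.isChain_iff_pairwise.mp (pv_isChain_lt l hs hc)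
    exact hlt.imp (fun h => ne_of_lt h)
  · intro hn
    exact hn.isChain

-- B computes 'no duplicates among the non-'.' entries'
theorem check3x3_alt_eq (board : List (List String)) :
    check3x3_alt board = decide (pvNums board).Nodup := by
  show ((PySem.List.sorted (pvNums board) (fun x => x) false).zip
        ((PySem.List.sorted (pvNums board) (fun x => x) false).drop 1)).all (fun p => p.1 != p.2)
      = decide (pvNums board).Nodup
  set l := PySem.List.sorted (pvNums board) (fun x => x) false with hl
  have hperm : l.Perm (pvNums board) := PySem.List.sorted_perm _ _ _
  have hsorted : l.Pairwise (· ≤ ·) := by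
    have := PySem.List.sorted_pairwise (xs := pvNums board) (key := fun x => x)
    simpa using this
  rw [pv_allZip_eq_isChain l]
  have : List.IsChain (· ≠ ·) l ↔ (pvNums board).Nodup := by
    rw [pv_isChain_ne_iff_nodup l hsorted]
    exact hperm.nodup_iff
  simp [this]

-- inner-loop invariant for A
theorem check3x3Row_spec (l : List String) :
    ∀ (d : PySem.Dict String Bool), d.keys.Nodup →
      match check3x3Row d l with
      | some d' => (d.keys ++ l.filter (fun num => num ≠ ".")).Nodup ∧
                   d'.keys = d.keys ++ l.filter (fun num => num ≠ ".")
      | none => ¬ (d.keys ++ l.filter (fun num => num ≠ ".")).Nodup := by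
  induction l with
  | nil => intro d hd; simpa using ⟨hd, rfl⟩
  | cons num rest ih =>
    intro d hd
    by_cases hdot : num = "."
    · simpa [check3x3Row, hdot] using ih d hd
    · by_cases hc : d.contains num = true
      · have hmem : num ∈ d.keys := (PySem.Dict.contains_iff_mem_keys d num).mp hc
        simp only [check3x3Row, if_neg hdot, if_pos hc]
        intro hn
        rw [List.filter_cons_of_pos (by simpa using hdot)] at hn
        have hdisj := (List.nodup_append.mp hn).2.2
        exact hdisj num hmem num (by simp) rfl
      · have hcf : d.contains num = false := by simpa using hc
        have hkeys : (d.insert num true).keys = d.keys ++ [num] :=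
          PySem.Dict.keys_insert_of_not_contains d true hcf
        have hmemnot : num ∉ d.keys := fun hm => hc ((PySem.Dict.contains_iff_mem_keys d num).mpr hm)
        have hnodup : (d.insert num true).keys.Nodup := by
          rw [hkeys, List.nodup_append]
          exact ⟨hd, by simp, by intro a ha b hb; simp at hb; subst hb; exact fun he => hmemnot (he ▸ ha)⟩
        have h := ih (d.insert num true) hnodup
        rw [hkeys] at h
        have hassoc : (d.keys ++ [num]) ++ rest.filter (fun n => n ≠ ".") =
            d.keys ++ (num :: rest).filter (fun n => n ≠ ".") := by
          rw [List.filter_cons_of_pos (by simpa using hdot)]; simp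
        rw [hassoc] at h
        simpa [check3x3Row, hdot, hcf] using h

-- outer-loop invariant for A
theorem check3x3Rows_spec (rows : List (List String)) :
    ∀ (d : PySem.Dict String Bool), d.keys.Nodup →
      check3x3Rows d rows = decide ((d.keys ++ pvNums rows).Nodup) := by
  induction rows with
  | nil => intro d hd; simp [check3x3Rows, pvNums, hd]
  | cons row rest ih =>
    intro d hd
    have h := check3x3Row_spec row d hd
    cases hrow : check3x3Row d row with
    | none =>
      rw [hrow] at h
      have : ¬ (d.keys ++ pvNums (row :: rest)).Nodup := by
        intro hn
        apply h
        have : (d.keys ++ row.filter (fun num => num ≠ ".")) ++ pvNums rest =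
            d.keys ++ pvNums (row :: rest) := by simp [pvNums]
        exact List.Nodup.of_append_left (this ▸ hn)
      simp [check3x3Rows, hrow, this]
    | some d' =>
      rw [hrow] at h
      obtain ⟨hnd, hk⟩ := h
      have hd' : d'.keys.Nodup := hk ▸ hnd
      have := ih d' hd'
      rw [hk] at this
      have hassoc : (d.keys ++ row.filter (fun num => num ≠ ".")) ++ pvNums rest =
          d.keys ++ pvNums (row :: rest) := by simp [pvNums]
      rw [hassoc] at this
      simpa [check3x3Rows, hrow] using this

-- ===== VERDICT (by name: the statement is the Claim_ definition above) =====
theorem check3x3_spec : Claim_equal_check3x3 := by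
  intro board _
  unfold Spec_check3x3 check3x3
  rw [check3x3_alt_eq, check3x3Rows_spec board PySem.Dict.empty (by simp [PySem.Dict.keys_empty])]
  simp [PySem.Dict.keys_empty]
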